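-- pv_equiv track=rewrite | github.com/karlot/aoc_2015 | 11/main.py | check3
-- ===== SOURCE A (Python) =====
-- def check3(pas):
--     for i, c in enumerate(pas[:-3]):
--         if c == pas[i+1]:   # found two letters identical
--             chunk = pas[i+2:]
--             for j, d in enumerate(chunk[:-1]):
--                 if d == c: # should not match equal
--                     continue
--                 if d == chunk[j+1]:
--                     return True
--             break
--     return False
-- ===== SOURCE B (Python) =====
-- def check3(pas):
--     # One flat pass over adjacent positions, remembering the first doubled letter.
--     first = None
--     for a, b in zip(pas, pas[1:]):
--         if a == b:
--             if first is None:
--                 first = a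
--             elif a != first:
--                 return True
--     return False
-- ===== Notes on version B (the rewrite author's own statement) =====
-- stated objective: simpler
-- what changed: A finds the first doubled letter in pas[:-3] and then rescans the suffix in a nested loop with continue/break; B is one flat pass over adjacent pairs carrying a single accumulator (the first doubled letter) and returning True on the first double of a different letter.
import Mathlib
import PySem

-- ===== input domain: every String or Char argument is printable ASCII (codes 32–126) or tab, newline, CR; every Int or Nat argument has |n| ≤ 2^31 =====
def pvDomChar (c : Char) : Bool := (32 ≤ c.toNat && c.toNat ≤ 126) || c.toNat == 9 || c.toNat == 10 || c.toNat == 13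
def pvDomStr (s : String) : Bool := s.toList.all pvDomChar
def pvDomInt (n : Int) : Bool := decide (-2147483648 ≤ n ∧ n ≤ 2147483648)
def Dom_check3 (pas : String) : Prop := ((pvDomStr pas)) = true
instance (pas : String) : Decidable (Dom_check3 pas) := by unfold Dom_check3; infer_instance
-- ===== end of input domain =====

-- B replaces A's find-first-double-then-rescan-the-suffix nesting with one flat
-- pass over adjacent pairs carrying a single accumulator (objective: simpler).

-- ===== PORT A =====
-- inner loop: for j, d in enumerate(chunk[:-1]): if d == c: continue; if d == chunk[j+1]: return True
def check3Inner (c : Char) (chunk : List Char) : List (Int × Char) → Bool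
  | [] => false
  | (j, d) :: rest =>
    if d = c then check3Inner c chunk rest
    else if PySem.List.pyGet? chunk (j + 1) == some d then true  -- chunk[j+1] is always in range here
    else check3Inner c chunk rest

-- outer loop: for i, c in enumerate(pas[:-3]): if c == pas[i+1]: <inner loop>; break
def check3Outer (l : List Char) : List (Int × Char) → Bool
  | [] => false
  | (i, c) :: rest =>
    if PySem.List.pyGet? l (i + 1) == some c then
      -- chunk = pas[i+2:]; after the inner loop Python breaks, then returns False,
      -- so the whole result is the inner loop's result
      let chunk := PySem.List.slice l (some (i + 2)) none
      check3Inner c chunk (PySem.List.enumerate (PySem.List.slice chunk none (some (-1))))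
    else check3Outer l rest

def check3 (pas : String) : Bool :=
  check3Outer pas.toList (PySem.List.enumerate (PySem.List.slice pas.toList none (some (-3))))

-- ===== PORT B =====
-- for a, b in zip(pas, pas[1:]): … with accumulator `first`
def check3AltGo : Option Char → List (Char × Char) → Bool
  | _, [] => false
  | first, (a, b) :: rest =>
    if a = b then
      match first with
      | none => check3AltGo (some a) rest
      | some f => if a ≠ f then true else check3AltGo (some f) rest
    else check3AltGo first rest

def check3_alt (pas : String) : Bool :=
  check3AltGo none (pas.toList.zip (PySem.List.slice pas.toList (some 1) none))

-- ===== PRECONDITION & SPEC =====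
def Spec_check3 (pas : String) (out : Bool) : Prop := out = check3_alt pas
instance (pas : String) (out : Bool) : Decidable (Spec_check3 pas out) := by unfold Spec_check3; infer_instance

-- ===== CLAIM (what is proved, stated in full; the proofs are below) =====
def Claim_equal_check3 : Prop := ∀ (pas : String), Dom_check3 pas → Spec_check3 pas (check3 pas)

-- ===== LEMMAS AND PROOFS =====

-- structural reading of A's inner loop: scan `suf` for an adjacent equal pair of a letter ≠ c
def innerS (c : Char) : List Char → Bool
  | d :: e :: t => if d = c then innerS c (e :: t) else if e = d then true else innerS c (e :: t)
  | _ => false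

-- structural reading of A: find the first adjacent equal pair, then innerS on the rest
def outerS : List Char → Bool
  | a :: b :: t => if a = b then innerS a t else outerS (b :: t)
  | _ => false

lemma innerS_short (c : Char) (l : List Char) (h : l.length ≤ 1) : innerS c l = false := by
  match l with
  | [] => rfl
  | [d] => rfl
  | d :: e :: t => simp at h

lemma outerS_short (l : List Char) (h : l.length ≤ 3) : outerS l = false := by
  match l with
  | [] => rfl
  | [a] => rfl
  | [a, b] => simp [outerS, innerS]
  | [a, b, c] =>
    simp only [outerS]
    split <;> [exact innerS_short _ _ (by simp); skip]
    split <;> [rfl; rfl]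
  | a :: b :: c :: d :: t => simp at h; omega

lemma inner_eq (c : Char) : ∀ (suf pre : List Char),
    check3Inner c (pre ++ suf)
      (PySem.List.enumerate (suf.take (suf.length - 1)) (pre.length : Int)) = innerS c suf := by
  intro suf
  induction suf with
  | nil => intro pre; simp [check3Inner, innerS, PySem.List.enumerate_nil]
  | cons d rest ih =>
    intro pre
    match rest with
    | [] => simp [check3Inner, innerS, PySem.List.enumerate_nil]
    | e :: t =>
      have htake : (d :: e :: t).take ((d :: e :: t).length - 1)
          = d :: (e :: t).take ((e :: t).length - 1) := by simp
      rw [htake, PySem.List.enumerate_cons]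
      show (if d = c then _ else if PySem.List.pyGet? (pre ++ d :: e :: t) ((pre.length : Int) + 1) == some d then _ else _) = _
      have hget : PySem.List.pyGet? (pre ++ d :: e :: t) ((pre.length : Int) + 1) = some e := by
        have : PySem.List.pyGet? ((pre ++ [d]) ++ e :: t) (((pre ++ [d]).length : Nat) : Int) = some e :=
          PySem.List.pyGet?_append_length _ _ _
        simpa [List.append_assoc, Nat.cast_add] using this
      have hrec : check3Inner c (pre ++ d :: e :: t)
          (PySem.List.enumerate ((e :: t).take ((e :: t).length - 1)) ((pre.length : Int) + 1)) = innerS c (e :: t) := by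
        have := ih (pre ++ [d])
        simpa [List.append_assoc, Nat.cast_add] using this
      rw [hget]
      show (if d = c then _ else if (some e == some d) then _ else _) = _
      simp only [innerS, beq_iff_eq, Option.some.injEq]
      split
      · exact hrec
      · split
        · rfl
        · exact hrec

lemma outer_eq : ∀ (suf pre : List Char),
    check3Outer (pre ++ suf)
      (PySem.List.enumerate (suf.take (suf.length - 3)) (pre.length : Int)) = outerS suf := by
  intro suf
  induction suf with
  | nil => intro pre; simp [check3Outer, outerS, PySem.List.enumerate_nil]
  | cons a rest ih =>
    intro pre
    by_cases hlen : rest.length ≤ 2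
    · have h0 : (a :: rest).length - 3 = 0 := by simp; omega
      rw [h0]
      simp only [List.take_zero, PySem.List.enumerate_nil]
      exact (outerS_short _ (by simp; omega)).symm
    · match rest, hlen with
      | b :: t, hlen =>
        have htake : (a :: b :: t).take ((a :: b :: t).length - 3)
            = a :: (b :: t).take ((b :: t).length - 3) := by
          have h1 : (a :: b :: t).length - 3 = ((b :: t).length - 3) + 1 := by
            simp at hlen ⊢; omega
          rw [h1, List.take_succ_cons]
        rw [htake, PySem.List.enumerate_cons]
        show (if PySem.List.pyGet? (pre ++ a :: b :: t) ((pre.length : Int) + 1) == some a then _ else _) = _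
        have hget : PySem.List.pyGet? (pre ++ a :: b :: t) ((pre.length : Int) + 1) = some b := by
          have : PySem.List.pyGet? ((pre ++ [a]) ++ b :: t) (((pre ++ [a]).length : Nat) : Int) = some b :=
            PySem.List.pyGet?_append_length _ _ _
          simpa [List.append_assoc, Nat.cast_add] using this
        rw [hget]
        show (if (some b == some a) then
            check3Inner a (PySem.List.slice (pre ++ a :: b :: t) (some ((pre.length : Int) + 2)) none)
              (PySem.List.enumerate (PySem.List.slice (PySem.List.slice (pre ++ a :: b :: t) (some ((pre.length : Int) + 2)) none) none (some (-1))))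
          else _) = _
        simp only [beq_iff_eq, Option.some.injEq, outerS]
        by_cases hab : a = b
        · subst hab
          have hchunk : PySem.List.slice (pre ++ a :: a :: t) (some ((pre.length : Int) + 2)) none = t := by
            have h2 : ((pre.length : Int) + 2) = ((pre.length + 2 : Nat) : Int) := by push_cast; ring
            rw [h2, PySem.List.slice_from_natCast]
            have hsplit : pre ++ a :: a :: t = (pre ++ [a, a]) ++ t := by simp
            have hl : pre.length + 2 = (pre ++ [a, a]).length := by simp
            rw [hsplit, hl, List.drop_left]
          rw [hchunk, PySem.List.slice_to_neg_one]
          have := inner_eq a t ([] : List Char)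
          simpa [List.dropLast_eq_take] using this
        · have hba : ¬ (b = a) := fun h => hab h.symm
          simp only [if_neg hba, if_neg hab]
          have := ih (pre ++ [a])
          simpa [List.append_assoc, Nat.cast_add] using this

lemma altGo_some_eq_innerS (c : Char) : ∀ (u : List Char),
    check3AltGo (some c) (u.zip u.tail) = innerS c u := by
  intro u
  induction u with
  | nil => rfl
  | cons d rest ih =>
    match rest with
    | [] => rfl
    | e :: t =>
      show check3AltGo (some c) ((d, e) :: (e :: t).zip t) = _
      have htail : (e :: t).zip t = (e :: t).zip (e :: t).tail := rfl
      by_cases hde : d = e <;> by_cases hdc : d = c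
      · subst hde; subst hdc
        simp [check3AltGo, innerS, htail, ih]
      · subst hde
        simp [check3AltGo, innerS, hdc]
      · subst hdc
        simp [check3AltGo, innerS, htail, ih, hde]
      · simp [check3AltGo, innerS, htail, ih, hde, hdc, Ne.symm hde]

lemma altGo_none_eq_outerS : ∀ (l : List Char),
    check3AltGo none (l.zip l.tail) = outerS l := by
  intro l
  induction l with
  | nil => rfl
  | cons a rest ih =>
    match rest with
    | [] => rfl
    | b :: t =>
      show check3AltGo none ((a, b) :: (b :: t).zip t) = _
      simp only [check3AltGo, outerS]
      by_cases hab : a = b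
      · subst hab
        -- first pair found; the overlapping pair (a, t.head) can never fire (same letter)
        match t with
        | [] => simp [check3AltGo, innerS]
        | t0 :: t1 =>
          rw [if_pos rfl, if_pos rfl]
          show check3AltGo (some a) ((a, t0) :: (t0 :: t1).zip t1) = innerS a (t0 :: t1)
          simp only [check3AltGo]
          have : (t0 :: t1).zip t1 = (t0 :: t1).zip (t0 :: t1).tail := rfl
          by_cases h0 : a = t0 <;> simp [h0, this, altGo_some_eq_innerS]
      · simp only [if_neg hab]
        have : (b :: t).zip t = (b :: t).zip (b :: t).tail := rfl
        rw [this, ih]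

-- ===== VERDICT (by name: the statement is the Claim_ definition above) =====
theorem check3_spec : Claim_equal_check3 := by
  intro pas _
  unfold Spec_check3 check3 check3_alt
  rw [PySem.List.slice_from_one]
  rw [PySem.List.slice_to_neg_ofNat pas.toList 3 (by omega)]
  have h := outer_eq pas.toList ([] : List Char)
  simp only [List.nil_append, List.length_nil, Nat.cast_zero] at h
  rw [h, altGo_none_eq_outerS]
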